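-- pv_equiv track=rewrite | github.com/ignacioFinochietti/2048 | 2048.py | pasar_ceros_izquierda
-- ===== SOURCE A (Python) =====
-- def pasar_ceros_izquierda(matriz):
--     # Intercambia posicion entre los 0 y los numeros distintos a 0, dejando a la izquierda los numeros distintos a 0 y a la derecha los 0 si es que los hay
--     for f in range(4):
--       for c in range(1,4):
--         aux=c
--         while matriz[f][aux-1] == 0 and aux >= 1:
--           box=matriz[f][aux-1]
--           matriz[f][aux-1] = matriz[f][aux]
--           matriz[f][aux]=box
--           aux = aux - 1
--     return matriz
-- ===== SOURCE B (Python) =====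
-- def pasar_ceros_izquierda(matriz):
--     # Gather-then-pad: for each of the first 4 rows, collect the nonzero
--     # entries among columns 0..3 in order, write them back left-aligned,
--     # then pad the remaining of the 4 slots with zeros.
--     for f in range(4):
--         fila = matriz[f]
--         nz = [fila[c] for c in range(4) if fila[c] != 0]
--         for i in range(4):
--             fila[i] = nz[i] if i < len(nz) else 0
--     return matriz
-- ===== Notes on version B (the rewrite author's own statement) =====
-- stated objective: simpler
-- what changed: Replaces A's per-cell adjacent-swap bubbling (nested loops with an inner while that swaps zeros rightward) by a single gather-then-pad pass per row: collect the nonzero entries of columns 0..3 in order and write them back left-aligned followed by zeros.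
import Mathlib
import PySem

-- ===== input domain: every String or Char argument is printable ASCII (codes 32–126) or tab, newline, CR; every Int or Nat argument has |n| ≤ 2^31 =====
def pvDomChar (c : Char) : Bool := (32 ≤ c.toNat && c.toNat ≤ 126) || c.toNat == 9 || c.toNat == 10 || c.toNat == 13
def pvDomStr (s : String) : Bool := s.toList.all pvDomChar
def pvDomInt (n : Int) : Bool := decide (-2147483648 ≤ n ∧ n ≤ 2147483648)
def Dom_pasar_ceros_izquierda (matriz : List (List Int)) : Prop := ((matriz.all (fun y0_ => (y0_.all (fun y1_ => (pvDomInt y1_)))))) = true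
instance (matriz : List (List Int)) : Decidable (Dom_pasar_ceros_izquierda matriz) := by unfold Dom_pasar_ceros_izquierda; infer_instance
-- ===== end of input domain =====

-- B replaces A's adjacent-swap bubbling with a single gather-then-pad pass per row (simpler);
-- A mutates `matriz` in place, B performs the same in-place mutation: the theorems are about the return value.

-- ===== PORT A =====
-- while matriz[f][aux-1] == 0 and aux >= 1: swap matriz[f][aux-1], matriz[f][aux]; aux -= 1
-- Recursion on aux. Python reads row[aux-1] BEFORE testing aux >= 1; at aux = 0 that read is
-- row[-1], which on the in-range rows admitted by Pre_ is a harmless read (the conjunct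
-- aux >= 1 then stops the loop), so testing aux ≥ 1 first is exact there.
def pvWhileA : List Int → Nat → List Int
  | row, 0 => row
  | row, a + 1 =>
    if row.getD a 0 = 0 then
      -- box = row[a]; row[a] = row[a+1]; row[a+1] = box
      pvWhileA ((row.set a (row.getD (a + 1) 0)).set (a + 1) (row.getD a 0)) a
    else row

-- for c in range(1,4): aux = c; while …
def pvRowA (row : List Int) : List Int :=
  (PySem.List.pyRange 1 4 1).foldl (fun r c => pvWhileA r c.toNat) row

-- for f in range(4): …  (in-place row update modelled by List.set)
def pasar_ceros_izquierda (matriz : List (List Int)) : List (List Int) :=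
  (PySem.List.pyRange 0 4 1).foldl
    (fun m f => m.set f.toNat (pvRowA (m.getD f.toNat []))) matriz

-- ===== PORT B =====
-- nz = [fila[c] for c in range(4) if fila[c] != 0]; for i in range(4): fila[i] = nz[i] if i < len(nz) else 0
def pvRowB (row : List Int) : List Int :=
  let nz := ((PySem.List.pyRange 0 4 1).map (fun c => row.getD c.toNat 0)).filter (fun x => x ≠ 0)
  (PySem.List.pyRange 0 4 1).foldl
    (fun r i => r.set i.toNat (if i.toNat < nz.length then nz.getD i.toNat 0 else 0)) row

def pasar_ceros_izquierda_alt (matriz : List (List Int)) : List (List Int) :=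
  (PySem.List.pyRange 0 4 1).foldl
    (fun m f => m.set f.toNat (pvRowB (m.getD f.toNat []))) matriz

-- ===== PRECONDITION & SPEC =====
-- Pre_ excludes exactly the inputs on which indexing raises IndexError: fewer than 4 rows, or a
-- row among the first 4 shorter than 4. (A happens to return on a few short-row inputs whose
-- zeros never push it to index 3; B raises IndexError on those too, so they stay outside Pre_.)
def Pre_pasar_ceros_izquierda (matriz : List (List Int)) : Prop :=
  4 ≤ matriz.length ∧ ∀ row ∈ matriz.take 4, 4 ≤ row.length
instance (matriz : List (List Int)) : Decidable (Pre_pasar_ceros_izquierda matriz) := by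
  unfold Pre_pasar_ceros_izquierda; infer_instance
def pvWitness_pasar_ceros_izquierda : List (List Int) :=
  [[0, 2, 0, 4], [2, 0, 0, 2], [0, 0, 0, 0], [4, 4, 2, 0]]
def Spec_pasar_ceros_izquierda (matriz : List (List Int)) (out : List (List Int)) : Prop := out = pasar_ceros_izquierda_alt matriz
instance (matriz : List (List Int)) (out : List (List Int)) : Decidable (Spec_pasar_ceros_izquierda matriz out) := by unfold Spec_pasar_ceros_izquierda; infer_instance

-- ===== CLAIM (what is proved, stated in full; the proofs are below) =====
def Claim_equal_pasar_ceros_izquierda : Prop := ∀ (matriz : List (List Int)), Dom_pasar_ceros_izquierda matriz → Pre_pasar_ceros_izquierda matriz → Spec_pasar_ceros_izquierda matriz (pasar_ceros_izquierda matriz)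

-- ===== LEMMAS AND PROOFS =====

theorem pvRange04 : PySem.List.pyRange 0 4 1 = [0, 1, 2, 3] := by decide
theorem pvRange14 : PySem.List.pyRange 1 4 1 = [1, 2, 3] := by decide

-- per-row agreement on rows of length ≥ 4 (only the first 4 cells are touched)
theorem pvRow_eq (a b c d : Int) (rest : List Int) :
    pvRowA (a :: b :: c :: d :: rest) = pvRowB (a :: b :: c :: d :: rest) := by
  by_cases ha : a = 0 <;> by_cases hb : b = 0 <;> by_cases hc : c = 0 <;> by_cases hd : d = 0 <;>
    subst_vars <;>
    simp_all [pvRowA, pvRowB, pvRange04, pvRange14, pvWhileA, List.getD]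

-- ===== VERDICT (by name: the statement is the Claim_ definition above) =====
theorem pasar_ceros_izquierda_spec : Claim_equal_pasar_ceros_izquierda := by
  intro matriz _ hpre
  unfold Spec_pasar_ceros_izquierda
  obtain ⟨hlen, hrows⟩ := hpre
  match matriz, hlen with
  | r0 :: r1 :: r2 :: r3 :: rs, _ =>
    have h0 := hrows r0 (by simp)
    have h1 := hrows r1 (by simp)
    have h2 := hrows r2 (by simp)
    have h3 := hrows r3 (by simp)
    match r0, h0 with
    | a0 :: b0 :: c0 :: d0 :: t0, _ =>
    match r1, h1 with
    | a1 :: b1 :: c1 :: d1 :: t1, _ =>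
    match r2, h2 with
    | a2 :: b2 :: c2 :: d2 :: t2, _ =>
    match r3, h3 with
    | a3 :: b3 :: c3 :: d3 :: t3, _ =>
      simp [pasar_ceros_izquierda, pasar_ceros_izquierda_alt, pvRange04, List.getD,
        pvRow_eq]
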